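-- pv_equiv track=rewrite | github.com/Ian9802/csse479 | AES.py | mux
-- ===== SOURCE A (Python) =====
-- cdKey = [
--     [2, 3, 1, 1],
--     [1, 2, 3, 1],
--     [1, 1, 2, 3],
--     [3, 1, 1, 2]
-- ]
--
-- def mux(col):
--     column = list()
--     for x in range(0, 4):
--         value = 0
--         for y in range(0, 4):
--             #might be how this works?
--             value = value ^ (finiteMult(cdKey[x][y], col[y]))
--         column.append(value)
--     return column
--
-- def finiteMult(a, b):
--     aString = '{0:08b}'.format(a)
--     bString = '{0:08b}'.format(b)
--     p = 0
--     for x in range(0, 8):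
--         if(bString[-1] == '1'):
--             p = p ^ a
--         b = b >> 1
--         carry = (aString[0] == '1')
--         a = (a << 1) % 256
--         if(carry):
--             a = a ^ 27
--         aString = '{0:08b}'.format(a)
--         bString = '{0:08b}'.format(b)
--     return p
-- ===== SOURCE B (Python) =====
-- def mux(col):
--     a0, a1, a2, a3 = (col[i] & 0xff for i in range(4))
--     t = a0 ^ a1 ^ a2 ^ a3
--     def xt(v):
--         return ((v << 1) ^ (0x1b if v & 0x80 else 0)) & 0xff
--     return [a0 ^ t ^ xt(a0 ^ a1),
--             a1 ^ t ^ xt(a1 ^ a2),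
--             a2 ^ t ^ xt(a2 ^ a3),
--             a3 ^ t ^ xt(a3 ^ a0)]
-- ===== Notes on version B (the rewrite author's own statement) =====
-- stated objective: idiomatic
-- what changed: Replaces the generic bit-string GF(256) multiplier (8-iteration loop over formatted binary strings, run 16 times against the cdKey matrix) with the classic closed-form MixColumns combination: mask the four bytes once and compute each output as ai ^ (a0^a1^a2^a3) ^ xtime(ai ^ a_next).
import Mathlib
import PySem

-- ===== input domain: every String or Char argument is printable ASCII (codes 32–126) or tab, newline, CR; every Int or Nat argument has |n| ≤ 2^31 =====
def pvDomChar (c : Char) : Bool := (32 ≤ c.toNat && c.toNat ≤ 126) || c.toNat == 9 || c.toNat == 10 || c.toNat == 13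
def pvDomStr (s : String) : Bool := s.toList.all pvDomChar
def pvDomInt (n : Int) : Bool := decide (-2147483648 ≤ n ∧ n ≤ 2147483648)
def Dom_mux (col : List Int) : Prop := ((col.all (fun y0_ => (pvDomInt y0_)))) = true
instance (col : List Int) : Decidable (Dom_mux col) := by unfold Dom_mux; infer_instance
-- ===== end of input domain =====

-- B replaces A's generic bit-string GF(256) multiplier and cdKey matrix with the classic
-- closed-form MixColumns combination (mask bytes once, xtime-based xor formula); idiomatic AES code.


-- ===== PORT A =====
-- helper: hand port of '{0:08b}'.format(n) — binary digits of |n|, '-' first for negatives,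
-- zero-padded between sign and digits to total width 8 (exact for every int)
def padZeros (w : Nat) (ds : List Char) : List Char := List.replicate (w - ds.length) '0' ++ ds
def fmt08b (n : Int) : List Char :=
  if n < 0 then '-' :: padZeros 7 (Nat.toDigits 2 n.natAbs) else padZeros 8 (Nat.toDigits 2 n.toNat)

-- the 'for x in range(0, 8)' loop of finiteMult, state (p, b, a, aString, bString)
def fmLoop : Nat → Int → Int → Int → List Char → List Char → Int
  | 0, p, _, _, _, _ => p
  | k+1, p, b, a, aString, bString =>
    let p := if PySem.List.pyGet? bString (-1) = some '1' then PySem.Int.bxor p a else p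
    let b := b >>> (1:Nat)
    let carry := PySem.List.pyGet? aString 0 = some '1'
    let a := PySem.Int.mod (a <<< (1:Nat)) 256
    let a := if carry then PySem.Int.bxor a 27 else a
    fmLoop k p b a (fmt08b a) (fmt08b b)

def finiteMult (a b : Int) : Int := fmLoop 8 0 b a (fmt08b a) (fmt08b b)

def cdKey : List (List Int) := [[2,3,1,1],[1,2,3,1],[1,1,2,3],[3,1,1,2]]

-- indices x, y range over 0..3 and are always in range on Pre_; .getD gives the looked-up element there
def mux (col : List Int) : List Int :=
  (PySem.List.pyRange 0 4 1).foldl (fun column x =>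
    column ++ [(PySem.List.pyRange 0 4 1).foldl (fun value y =>
      PySem.Int.bxor value (finiteMult (PySem.List.pyGetD (PySem.List.pyGetD cdKey x []) y 0)
                                        (PySem.List.pyGetD col y 0))) 0]) []

-- ===== PORT B =====
def xt (v : Int) : Int :=
  PySem.Int.band (PySem.Int.bxor (v <<< (1:Nat)) (if PySem.Int.band v 128 ≠ 0 then 27 else 0)) 255

def mux_alt (col : List Int) : List Int :=
  let a0 := PySem.Int.band (PySem.List.pyGetD col 0 0) 255
  let a1 := PySem.Int.band (PySem.List.pyGetD col 1 0) 255
  let a2 := PySem.Int.band (PySem.List.pyGetD col 2 0) 255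
  let a3 := PySem.Int.band (PySem.List.pyGetD col 3 0) 255
  let t := PySem.Int.bxor (PySem.Int.bxor (PySem.Int.bxor a0 a1) a2) a3
  [PySem.Int.bxor (PySem.Int.bxor a0 t) (xt (PySem.Int.bxor a0 a1)),
   PySem.Int.bxor (PySem.Int.bxor a1 t) (xt (PySem.Int.bxor a1 a2)),
   PySem.Int.bxor (PySem.Int.bxor a2 t) (xt (PySem.Int.bxor a2 a3)),
   PySem.Int.bxor (PySem.Int.bxor a3 t) (xt (PySem.Int.bxor a3 a0))]

-- ===== PRECONDITION & SPEC =====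
-- A raises IndexError (col[y]) when the column has fewer than 4 entries; nothing else is excluded.
def Pre_mux (col : List Int) : Prop := 4 ≤ col.length
instance (col : List Int) : Decidable (Pre_mux col) := by unfold Pre_mux; infer_instance
def pvWitness_mux : List Int := [69, 103, 137, 171]

def Spec_mux (col : List Int) (out : List Int) : Prop := out = mux_alt col
instance (col : List Int) (out : List Int) : Decidable (Spec_mux col out) := by unfold Spec_mux; infer_instance

-- ===== CLAIM (what is proved, stated in full; the proofs are below) =====
def Claim_equal_mux : Prop := ∀ (col : List Int), Dom_mux col → Pre_mux col → Spec_mux col (mux col)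

-- ===== LEMMAS AND PROOFS =====

-- Nat-level mirror of B's xtime on one masked byte
def xtN (m : Nat) : Nat := (m <<< 1 ^^^ (if m &&& 128 ≠ 0 then 27 else 0)) &&& 255

theorem toDigitsCore_app (bs : Nat) : ∀ (f n : Nat) (ds : List Char),
    Nat.toDigitsCore bs f n ds = Nat.toDigitsCore bs f n [] ++ ds := by
  intro f
  induction f with
  | zero => intro n ds; simp [Nat.toDigitsCore]
  | succ f ih =>
    intro n ds
    simp only [Nat.toDigitsCore]
    by_cases h : n / bs = 0
    · simp [h]
    · simp only [if_neg h]
      rw [ih (n / bs) ((n % bs).digitChar :: ds), ih (n / bs) [(n % bs).digitChar]]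
      simp

theorem toDigits_two_getLast (n : Nat) :
    (Nat.toDigits 2 n).getLast? = some ((n % 2).digitChar) := by
  unfold Nat.toDigits
  simp only [Nat.toDigitsCore]
  by_cases h : n / 2 = 0
  · simp [h]
  · rw [if_neg h, toDigitsCore_app]
    simp

theorem getLast?_cons_ne {α : Type} (c : α) (l : List α) (h : l ≠ []) :
    (c :: l).getLast? = l.getLast? := by
  rw [show c :: l = [c] ++ l from rfl, List.getLast?_append_of_ne_nil _ h]

theorem toDigits_ne_nil (m : Nat) : Nat.toDigits 2 m ≠ [] := by
  intro h
  have := toDigits_two_getLast m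
  rw [h] at this; simp at this

theorem padZeros_ne_nil (w : Nat) (m : Nat) : padZeros w (Nat.toDigits 2 m) ≠ [] := by
  unfold padZeros
  simp [toDigits_ne_nil m]

theorem last_padZeros (m w : Nat) :
    (padZeros w (Nat.toDigits 2 m)).getLast? = some ((m % 2).digitChar) := by
  unfold padZeros
  rw [List.getLast?_append_of_ne_nil _ (toDigits_ne_nil m), toDigits_two_getLast]

theorem digitChar_mod2 (n : Nat) : Nat.digitChar (n % 2) = if n % 2 = 1 then '1' else '0' := by
  rcases Nat.mod_two_eq_zero_or_one n with h | h <;> simp [h, Nat.digitChar]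

theorem last_fmt (b : Int) :
    PySem.List.pyGet? (fmt08b b) (-1) = some (if b % 2 = 1 then '1' else '0') := by
  rw [PySem.List.pyGet?_neg_one]
  unfold fmt08b
  by_cases hb : b < 0
  · rw [if_pos hb, getLast?_cons_ne _ _ (padZeros_ne_nil _ _), last_padZeros, digitChar_mod2]
    congr 1
    by_cases h : b.natAbs % 2 = 1
    · rw [if_pos h, if_pos (by omega)]
    · rw [if_neg h, if_neg (by omega)]
  · rw [if_neg hb, last_padZeros, digitChar_mod2]
    congr 1
    by_cases h : b.toNat % 2 = 1
    · rw [if_pos h, if_pos (by omega)]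
    · rw [if_neg h, if_neg (by omega)]

theorem band255 (c : Int) : PySem.Int.band c 255 = c % 256 := by
  have hand : ∀ x : Nat, x &&& 255 = x % 256 := fun x => by
    have := Nat.and_two_pow_sub_one_eq_mod x 8; norm_num at this; omega
  have h255 : (255:Int).toNat = 255 := rfl
  by_cases h : 0 ≤ c
  · rw [PySem.Int.band, if_pos h, if_pos (by norm_num), h255, hand]
    omega
  · rw [PySem.Int.band, if_neg h, if_pos (by norm_num), h255, Nat.and_comm, hand]
    omega

theorem bit_emod (c : Int) (k : Nat) (hk : k < 8) :
    ((c >>> k) % 2 = 1) ↔ ((c % 256).toNat).testBit k := by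
  rw [Int.shiftRight_eq_div_pow, Nat.testBit_eq_decide_div_mod_eq]
  interval_cases k <;> norm_num <;> omega

theorem cond_iff (P : Prop) [Decidable P] :
    ((some (if P then '1' else '0') : Option Char) = some '1') ↔ P := by
  split <;> simp_all

theorem sr2 (c : Int) : c >>> (1:Nat) >>> (1:Nat) = c >>> (2:Nat) := (Int.shiftRight_add c 1 1).symm
theorem sr3 (c : Int) : c >>> (2:Nat) >>> (1:Nat) = c >>> (3:Nat) := (Int.shiftRight_add c 2 1).symm
theorem sr4 (c : Int) : c >>> (3:Nat) >>> (1:Nat) = c >>> (4:Nat) := (Int.shiftRight_add c 3 1).symm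
theorem sr5 (c : Int) : c >>> (4:Nat) >>> (1:Nat) = c >>> (5:Nat) := (Int.shiftRight_add c 4 1).symm
theorem sr6 (c : Int) : c >>> (5:Nat) >>> (1:Nat) = c >>> (6:Nat) := (Int.shiftRight_add c 5 1).symm
theorem sr7 (c : Int) : c >>> (6:Nat) >>> (1:Nat) = c >>> (7:Nat) := (Int.shiftRight_add c 6 1).symm

theorem bit0' (c : Int) : (c % 2 = 1) ↔ ((c % 256).toNat).testBit 0 := by
  have := bit_emod c 0 (by norm_num); simpa using this

set_option maxRecDepth 4096 in
theorem fm1 (c : Int) : finiteMult 1 c = (((c % 256).toNat : Nat) : Int) := by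
  have hm : (c % 256).toNat < 256 := by omega
  simp only [finiteMult, fmLoop, last_fmt, cond_iff, sr2, sr3, sr4, sr5, sr6, sr7,
    bit0', bit_emod c 1 (by norm_num), bit_emod c 2 (by norm_num), bit_emod c 3 (by norm_num),
    bit_emod c 4 (by norm_num), bit_emod c 5 (by norm_num), bit_emod c 6 (by norm_num),
    bit_emod c 7 (by norm_num)]
  generalize hg : (c % 256).toNat = m at *
  clear hg
  revert hm
  revert m
  decide

set_option maxRecDepth 4096 in
theorem fm2 (c : Int) : finiteMult 2 c = ((xtN (c % 256).toNat : Nat) : Int) := by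
  have hm : (c % 256).toNat < 256 := by omega
  simp only [finiteMult, fmLoop, last_fmt, cond_iff, sr2, sr3, sr4, sr5, sr6, sr7,
    bit0', bit_emod c 1 (by norm_num), bit_emod c 2 (by norm_num), bit_emod c 3 (by norm_num),
    bit_emod c 4 (by norm_num), bit_emod c 5 (by norm_num), bit_emod c 6 (by norm_num),
    bit_emod c 7 (by norm_num)]
  generalize hg : (c % 256).toNat = m at *
  clear hg
  revert hm
  revert m
  decide

set_option maxRecDepth 4096 in
theorem fm3 (c : Int) :
    finiteMult 3 c = (((c % 256).toNat ^^^ xtN (c % 256).toNat : Nat) : Int) := by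
  have hm : (c % 256).toNat < 256 := by omega
  simp only [finiteMult, fmLoop, last_fmt, cond_iff, sr2, sr3, sr4, sr5, sr6, sr7,
    bit0', bit_emod c 1 (by norm_num), bit_emod c 2 (by norm_num), bit_emod c 3 (by norm_num),
    bit_emod c 4 (by norm_num), bit_emod c 5 (by norm_num), bit_emod c 6 (by norm_num),
    bit_emod c 7 (by norm_num)]
  generalize hg : (c % 256).toNat = m at *
  clear hg
  revert hm
  revert m
  decide

theorem and128_cases (x : Nat) : x &&& 128 = 0 ∨ x &&& 128 = 128 := by
  have := Nat.and_two_pow x 7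
  norm_num at this
  rcases hb : x.testBit 7 <;> rw [hb] at this <;> simp at this <;> omega

theorem xtN_xor (x y : Nat) : xtN (x ^^^ y) = xtN x ^^^ xtN y := by
  unfold xtN
  have hxy : (x ^^^ y) &&& 128 = (x &&& 128) ^^^ (y &&& 128) := Nat.and_xor_distrib_right
  rw [Nat.shiftLeft_xor_distrib]
  rcases and128_cases x with hx | hx <;> rcases and128_cases y with hy | hy <;>
    rw [hx, hy] at hxy <;> simp only [hxy, hx, hy] <;> norm_num <;>
    simp [← Nat.and_xor_distrib_right, Nat.xor_assoc, Nat.xor_comm, Nat.xor_left_comm]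

theorem natCast_shiftLeft_one (m : Nat) : ((m : Int) <<< (1:Nat)) = ((m <<< 1 : Nat) : Int) := by
  simp [Int.shiftLeft_eq, Nat.shiftLeft_eq]

theorem band255' (c : Int) : PySem.Int.band 255 c = (((c % 256).toNat : Nat) : Int) := by
  rw [PySem.Int.band_comm, band255]; omega

theorem bxor_zero_left (x : Int) : PySem.Int.bxor 0 x = x := by
  rw [PySem.Int.bxor_comm, PySem.Int.bxor_zero]

theorem xt_cast (m : Nat) : xt ((m : Nat) : Int) = ((xtN m : Nat) : Int) := by
  unfold xt xtN
  rw [natCast_shiftLeft_one,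
      show (128:Int) = ((128:Nat) : Int) from rfl, show (27:Int) = ((27:Nat) : Int) from rfl,
      show (255:Int) = ((255:Nat) : Int) from rfl, PySem.Int.band_natCast]
  by_cases h : m &&& 128 = 0
  · rw [if_neg (by simp [h]), if_neg (by simp [h]),
        show (0:Int) = ((0:Nat) : Int) from rfl, PySem.Int.bxor_natCast, PySem.Int.band_natCast]
  · rw [if_pos (by simpa using h), if_pos h, PySem.Int.bxor_natCast, PySem.Int.band_natCast]

-- ===== VERDICT (by name: the statement is the Claim_ definition above) =====
set_option maxHeartbeats 2000000 in
theorem mux_spec : Claim_equal_mux := by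
  intro col _hdom hpre
  unfold Spec_mux
  match col, hpre with
  | c0 :: c1 :: c2 :: c3 :: rest, _ =>
    show mux (c0 :: c1 :: c2 :: c3 :: rest) = mux_alt (c0 :: c1 :: c2 :: c3 :: rest)
    simp only [mux, mux_alt, show PySem.List.pyRange 0 4 1 = [0,1,2,3] from rfl,
      List.foldl, cdKey]
    simp only [pysem]
    have h0 : (c0 :: c1 :: c2 :: c3 :: rest).getD 0 0 = c0 := rfl
    have h1 : (c0 :: c1 :: c2 :: c3 :: rest).getD 1 0 = c1 := rfl
    have h2 : (c0 :: c1 :: c2 :: c3 :: rest).getD 2 0 = c2 := rfl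
    have h3 : (c0 :: c1 :: c2 :: c3 :: rest).getD 3 0 = c3 := rfl
    have k00 : (([[2,3,1,1],[1,2,3,1],[1,1,2,3],[3,1,1,2]] : List (List Int)).getD 0 []).getD 0 0 = 2 := rfl
    have k01 : (([[2,3,1,1],[1,2,3,1],[1,1,2,3],[3,1,1,2]] : List (List Int)).getD 0 []).getD 1 0 = 3 := rfl
    have k02 : (([[2,3,1,1],[1,2,3,1],[1,1,2,3],[3,1,1,2]] : List (List Int)).getD 0 []).getD 2 0 = 1 := rfl
    have k03 : (([[2,3,1,1],[1,2,3,1],[1,1,2,3],[3,1,1,2]] : List (List Int)).getD 0 []).getD 3 0 = 1 := rfl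
    have k10 : (([[2,3,1,1],[1,2,3,1],[1,1,2,3],[3,1,1,2]] : List (List Int)).getD 1 []).getD 0 0 = 1 := rfl
    have k11 : (([[2,3,1,1],[1,2,3,1],[1,1,2,3],[3,1,1,2]] : List (List Int)).getD 1 []).getD 1 0 = 2 := rfl
    have k12 : (([[2,3,1,1],[1,2,3,1],[1,1,2,3],[3,1,1,2]] : List (List Int)).getD 1 []).getD 2 0 = 3 := rfl
    have k13 : (([[2,3,1,1],[1,2,3,1],[1,1,2,3],[3,1,1,2]] : List (List Int)).getD 1 []).getD 3 0 = 1 := rfl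
    have k20 : (([[2,3,1,1],[1,2,3,1],[1,1,2,3],[3,1,1,2]] : List (List Int)).getD 2 []).getD 0 0 = 1 := rfl
    have k21 : (([[2,3,1,1],[1,2,3,1],[1,1,2,3],[3,1,1,2]] : List (List Int)).getD 2 []).getD 1 0 = 1 := rfl
    have k22 : (([[2,3,1,1],[1,2,3,1],[1,1,2,3],[3,1,1,2]] : List (List Int)).getD 2 []).getD 2 0 = 2 := rfl
    have k23 : (([[2,3,1,1],[1,2,3,1],[1,1,2,3],[3,1,1,2]] : List (List Int)).getD 2 []).getD 3 0 = 3 := rfl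
    have k30 : (([[2,3,1,1],[1,2,3,1],[1,1,2,3],[3,1,1,2]] : List (List Int)).getD 3 []).getD 0 0 = 3 := rfl
    have k31 : (([[2,3,1,1],[1,2,3,1],[1,1,2,3],[3,1,1,2]] : List (List Int)).getD 3 []).getD 1 0 = 1 := rfl
    have k32 : (([[2,3,1,1],[1,2,3,1],[1,1,2,3],[3,1,1,2]] : List (List Int)).getD 3 []).getD 2 0 = 1 := rfl
    have k33 : (([[2,3,1,1],[1,2,3,1],[1,1,2,3],[3,1,1,2]] : List (List Int)).getD 3 []).getD 3 0 = 2 := rfl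
    simp only [h0, h1, h2, h3, k00, k01, k02, k03, k10, k11, k12, k13, k20, k21, k22, k23, k30, k31, k32, k33, band255', fm1, fm2, fm3, bxor_zero_left]
    generalize (c0 % 256).toNat = m0
    generalize (c1 % 256).toNat = m1
    generalize (c2 % 256).toNat = m2
    generalize (c3 % 256).toNat = m3
    simp only [List.nil_append, List.cons_append]
    simp only [PySem.Int.bxor_natCast, xt_cast, List.cons.injEq, and_true, Nat.cast_inj]
    refine ⟨?_, ?_, ?_, ?_⟩ <;>
      simp [xtN_xor, Nat.xor_comm, Nat.xor_left_comm, Nat.xor_xor_cancel_left, Nat.xor_self,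
        Nat.xor_zero]
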